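-- pv_equiv track=rewrite | github.com/bishnusharma/AILABAssignmentFinalBy021_324 | BlockArrangementHeuristic.py | global_heuristic
-- ===== SOURCE A (Python) =====
-- def global_heuristic(state, goal):
--     h = 0
--     for i in range(len(state)):
--         block = state[i]
--         below_state = state[i + 1:]
--         goal_index = goal.index(block)
--         below_goal = goal[goal_index + 1:]
--
--         k = len(below_state)
--
--         if below_state == below_goal:
--             h += k
--         else:
--             h -= k
--     return h
-- ===== SOURCE B (Python) =====
-- def global_heuristic(state, goal):
--     n, m = len(state), len(goal)
--     first = {}
--     for j, b in enumerate(goal):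
--         if b not in first:
--             first[b] = j
--     L = 0
--     while L < n and L < m and state[n - 1 - L] == goal[m - 1 - L]:
--         L += 1
--     h = 0
--     for i, b in enumerate(state):
--         k = n - 1 - i
--         if k <= L and first[b] == m - n + i:
--             h += k
--         else:
--             h -= k
--     return h
-- ===== Notes on version B (the rewrite author's own statement) =====
-- stated objective: faster
-- what changed: Replaces the per-index goal.index scan and per-index suffix-slice comparison by a first-occurrence index map built once plus one longest-common-suffix precomputation, answering each suffix-equality test in O(1).
import Mathlib
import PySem

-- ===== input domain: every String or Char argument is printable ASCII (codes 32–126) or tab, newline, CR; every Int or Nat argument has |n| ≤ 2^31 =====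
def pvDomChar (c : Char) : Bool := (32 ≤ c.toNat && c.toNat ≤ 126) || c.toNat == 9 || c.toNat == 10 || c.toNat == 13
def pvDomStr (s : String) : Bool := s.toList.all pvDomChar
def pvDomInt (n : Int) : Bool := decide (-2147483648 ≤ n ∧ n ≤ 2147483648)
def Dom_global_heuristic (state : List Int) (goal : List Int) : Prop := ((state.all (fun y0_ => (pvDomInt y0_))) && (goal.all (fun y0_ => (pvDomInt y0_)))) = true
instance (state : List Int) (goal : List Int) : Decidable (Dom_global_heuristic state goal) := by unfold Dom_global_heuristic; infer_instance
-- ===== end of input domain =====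

-- B replaces A's per-index goal.index scan and per-index suffix-slice comparison by a
-- first-occurrence index map built once plus one longest-common-suffix precomputation.

-- ===== PORT A =====
def global_heuristic (state : List Int) (goal : List Int) : Int :=
  (PySem.List.pyRange 0 (state.length) 1).foldl (fun h i =>
    let block := PySem.List.pyGetD state i 0
    let below_state := PySem.List.slice state (some (i + 1)) none
    -- goal.index(block): none = ValueError, excluded by Pre_global_heuristic
    let goal_index : Nat := (PySem.List.index? goal block).getD 0
    let below_goal := PySem.List.slice goal (some ((goal_index : Int) + 1)) none
    let k : Int := below_state.length
    if below_state = below_goal then h + k else h - k) 0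

-- ===== PORT B =====
-- first-occurrence index of each block in goal (the `first` dict loop of Source B)
def firstIndex (goal : List Int) : PySem.Dict Int Int :=
  (PySem.List.enumerate goal 0).foldl
    (fun d p => if d.contains p.2 then d else d.insert p.2 p.1) PySem.Dict.empty

-- Source B's while loop over the matching trailing elements, as recursion on the reversed lists (exact)
def commonSuffixLen : List Int → List Int → Nat
  | a :: as, b :: bs => if a = b then commonSuffixLen as bs + 1 else 0
  | _, _ => 0

def global_heuristic_alt (state : List Int) (goal : List Int) : Int :=
  let n : Int := state.length
  let m : Int := goal.length
  let first := firstIndex goal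
  let L : Nat := commonSuffixLen state.reverse goal.reverse
  (PySem.List.enumerate state 0).foldl (fun h p =>
    let k : Int := n - 1 - p.1
    -- first[b]: KeyError (none) outside Pre_global_heuristic
    if k ≤ (L : Int) ∧ (first.get? p.2).getD 0 = m - n + p.1 then h + k else h - k) 0

-- ===== PRECONDITION & SPEC =====
-- Pre_ excludes exactly the inputs on which A's goal.index(block) raises ValueError
def Pre_global_heuristic (state : List Int) (goal : List Int) : Prop :=
  ∀ b ∈ state, b ∈ goal
instance (state : List Int) (goal : List Int) : Decidable (Pre_global_heuristic state goal) := by unfold Pre_global_heuristic; infer_instance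

def pvWitness_global_heuristic : List Int × List Int := ([2, 1], [1, 2])

def Spec_global_heuristic (state : List Int) (goal : List Int) (out : Int) : Prop := out = global_heuristic_alt state goal
instance (state : List Int) (goal : List Int) (out : Int) : Decidable (Spec_global_heuristic state goal out) := by unfold Spec_global_heuristic; infer_instance

-- ===== CLAIM (what is proved, stated in full; the proofs are below) =====
def Claim_equal_global_heuristic : Prop := ∀ (state : List Int) (goal : List Int), Dom_global_heuristic state goal → Pre_global_heuristic state goal → Spec_global_heuristic state goal (global_heuristic state goal)


-- ===== LEMMAS AND PROOFS =====

-- the first-occurrence dict looks up like goal.index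
lemma firstIndex_get?_aux (goal : List Int) (d : PySem.Dict Int Int) (s : Int) (x : Int) :
    ((PySem.List.enumerate goal s).foldl
        (fun d p => if d.contains p.2 then d else d.insert p.2 p.1) d).get? x
      = if d.contains x then d.get? x
        else (PySem.List.index? goal x).map (fun j => s + (j : Int)) := by
  induction goal generalizing d s with
  | nil =>
    simp only [PySem.List.enumerate_nil, List.foldl_nil]
    by_cases hc : d.contains x
    · simp [hc]
    · have : d.get? x = none := by
        rw [PySem.Dict.get?_eq_none_iff_contains]; simpa using hc
      simp [hc, this, PySem.List.index?_eq_idxOf?]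
  | cons a as ih =>
    rw [PySem.List.enumerate_cons, List.foldl_cons, ih]
    by_cases hax : x = a
    · subst hax
      rw [PySem.List.index?_cons_self]
      by_cases hc : d.contains x
      · simp [hc]
      · simp [hc, PySem.Dict.get?_insert_self]
    · rw [PySem.List.index?_cons_of_ne as (Ne.symm hax)]
      by_cases hc : d.contains a
      · simp only [hc, if_true]
        by_cases hcx : d.contains x
        · simp [hcx]
        · simp only [hcx, Bool.false_eq_true, if_false]
          cases PySem.List.index? as x <;> simp
          ring
      · simp only [hc, Bool.false_eq_true, if_false]
        have hcx : (d.insert a s).contains x = d.contains x := by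
          simp [PySem.Dict.contains_insert, hax]
        rw [hcx, PySem.Dict.get?_insert_of_ne d s hax]
        by_cases hdx : d.contains x
        · simp [hdx]
        · simp only [hdx, Bool.false_eq_true, if_false]
          cases PySem.List.index? as x <;> simp
          ring

lemma firstIndex_get? (goal : List Int) (x : Int) :
    (firstIndex goal).get? x = (PySem.List.index? goal x).map (fun j => (j : Int)) := by
  unfold firstIndex
  rw [firstIndex_get?_aux]
  simp

-- equal takes of length k are exactly a common prefix of length at least k
lemma take_eq_iff_le_csl (u v : List Int) (k : Nat) (hk : k ≤ u.length) :
    u.take k = v.take k ↔ k ≤ commonSuffixLen u v := by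
  induction u generalizing v k with
  | nil => simp at hk; simp [hk]
  | cons a as ih =>
    cases k with
    | zero => simp
    | succ k =>
      cases v with
      | nil => simp [commonSuffixLen]
      | cons b bs =>
        simp only [List.take_succ_cons, List.cons.injEq, commonSuffixLen]
        by_cases hab : a = b
        · simp only [hab, if_pos, true_and, ih bs k (by simpa using Nat.succ_le_succ_iff.mp hk)]
          simp
        · simp [hab]

-- suffix equality characterised by a length match plus the common-suffix length
lemma drop_eq_iff (state goal : List Int) (i gi : Nat) :
    state.drop (i + 1) = goal.drop (gi + 1) ↔
      (goal.length - gi - 1 = state.length - i - 1 ∧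
       state.length - i - 1 ≤ commonSuffixLen state.reverse goal.reverse) := by
  constructor
  · intro h
    have hlen : goal.length - gi - 1 = state.length - i - 1 := by
      have := congrArg List.length h
      simp [List.length_drop] at this
      omega
    refine ⟨hlen, ?_⟩
    have hrev := congrArg List.reverse h
    rw [List.reverse_drop, List.reverse_drop] at hrev
    have h1 : state.length - (i + 1) = state.length - i - 1 := by omega
    have h2 : goal.length - (gi + 1) = goal.length - gi - 1 := by omega
    rw [h1, h2, hlen] at hrev
    exact (take_eq_iff_le_csl _ _ _ (by simp; omega)).mp hrev
  · rintro ⟨hlen, hL⟩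
    have hrev : state.reverse.take (state.length - i - 1) = goal.reverse.take (state.length - i - 1) :=
      (take_eq_iff_le_csl _ _ _ (by simp; omega)).mpr hL
    have : (state.drop (i + 1)).reverse = (goal.drop (gi + 1)).reverse := by
      rw [List.reverse_drop, List.reverse_drop]
      have h1 : state.length - (i + 1) = state.length - i - 1 := by omega
      have h2 : goal.length - (gi + 1) = state.length - i - 1 := by omega
      rw [h1, h2, hrev]
    simpa using congrArg List.reverse this

-- the common ± accumulation loop as a sum
lemma foldl_if_sub {α : Type} (l : List α) (c : α → Prop) [DecidablePred c] (f : α → Int) (h0 : Int) :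
    l.foldl (fun h x => if c x then h + f x else h - f x) h0
      = h0 + (l.map (fun x => if c x then f x else -f x)).sum := by
  induction l generalizing h0 with
  | nil => simp
  | cons a l ih => simp only [List.foldl_cons, List.map_cons, List.sum_cons, ih]; split_ifs <;> ring

-- a map over enumerate is a map over the index range
lemma enumerate_map_eq {β : Type} (xs : List Int) (s : Int) (g : Int × Int → β) :
    (PySem.List.enumerate xs s).map g
      = (List.range xs.length).map (fun (j : Nat) => g (s + (j : Int), xs.getD j 0)) := by
  induction xs generalizing s with
  | nil => simp [PySem.List.enumerate_nil]
  | cons x xs ih =>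
    rw [PySem.List.enumerate_cons, List.map_cons, ih (s + 1), List.length_cons,
      List.range_succ_eq_map, List.map_cons, List.map_map]
    refine congrArg₂ List.cons (by norm_num) ?_
    refine List.map_congr_left fun j hj => ?_
    have : s + 1 + (j : Int) = s + ((j + 1 : Nat) : Int) := by push_cast; ring
    simp [Function.comp, this]

-- A's per-index branch condition and value
abbrev condA (state goal : List Int) (i : Int) : Prop :=
  PySem.List.slice state (some (i + 1)) none
    = PySem.List.slice goal
        (some ((((PySem.List.index? goal (PySem.List.pyGetD state i 0)).getD 0 : Nat) : Int) + 1)) none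
def kA (state : List Int) (i : Int) : Int := (PySem.List.slice state (some (i + 1)) none).length
-- B's per-index branch condition and value
abbrev condB (state goal : List Int) (p : Int × Int) : Prop :=
  (state.length : Int) - 1 - p.1 ≤ (commonSuffixLen state.reverse goal.reverse : Int) ∧
    ((firstIndex goal).get? p.2).getD 0 = (goal.length : Int) - state.length + p.1
def kB (state : List Int) (p : Int × Int) : Int := (state.length : Int) - 1 - p.1

-- the two per-index contributions agree
lemma point_eq (state goal : List Int) (hpre : ∀ b ∈ state, b ∈ goal)
    (j : Nat) (hj : j < state.length) :
    (if condA state goal j then kA state j else -(kA state j))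
      = (if condB state goal ((j : Int), state.getD j 0) then kB state ((j : Int), state.getD j 0)
         else -(kB state ((j : Int), state.getD j 0))) := by
  have hb : state.getD j 0 = state[j] := List.getD_eq_getElem state 0 hj
  have hmem : state.getD j 0 ∈ goal := hpre _ (hb ▸ state.getElem_mem hj)
  obtain ⟨gi, hgi⟩ : ∃ gi, PySem.List.index? goal (state.getD j 0) = some gi :=
    Option.isSome_iff_exists.mp ((PySem.List.index?_isSome_iff _ _).mpr hmem)
  obtain ⟨hglt, -, -⟩ := PySem.List.getElem_of_index?_eq_some hgi
  have s1 : PySem.List.slice state (some ((j : Int) + 1)) none = state.drop (j + 1) := by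
    rw [show ((j : Int) + 1) = ((j + 1 : Nat) : Int) by push_cast; ring,
      PySem.List.slice_from_natCast]
  have s2 : PySem.List.slice goal (some ((gi : Int) + 1)) none = goal.drop (gi + 1) := by
    rw [show ((gi : Int) + 1) = ((gi + 1 : Nat) : Int) by push_cast; ring,
      PySem.List.slice_from_natCast]
  have e2 : (firstIndex goal).get? (state.getD j 0) = some ((gi : Nat) : Int) := by
    rw [firstIndex_get?, hgi]; rfl
  unfold condA condB kA kB
  dsimp only
  simp only [PySem.List.pyGetD_natCast, hgi, Option.getD_some, s1, s2, e2, drop_eq_iff,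
    List.length_drop]
  split_ifs <;> omega

-- ===== VERDICT (by name: the statement is the Claim_ definition above) =====
theorem global_heuristic_spec : Claim_equal_global_heuristic := by
  intro state goal _ hpre
  unfold Spec_global_heuristic
  have hA : global_heuristic state goal
      = 0 + ((PySem.List.pyRange 0 (state.length) 1).map
          (fun i => if condA state goal i then kA state i else -(kA state i))).sum :=
    foldl_if_sub _ _ _ 0
  have hB : global_heuristic_alt state goal
      = 0 + ((PySem.List.enumerate state 0).map
          (fun p => if condB state goal p then kB state p else -(kB state p))).sum :=
    foldl_if_sub _ _ _ 0
  rw [hA, hB, enumerate_map_eq, PySem.List.pyRange_one,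
    show (((state.length : Int) - 0).toNat) = state.length by omega, List.map_map]
  refine congrArg (0 + ·) (congrArg List.sum (List.map_congr_left fun j hj => ?_))
  rw [List.mem_range] at hj
  simpa using point_eq state goal hpre j hj
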